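-- pv_equiv track=rewrite | github.com/denzoned/pm4py-distr | pm4pydistr/discovery/imd/detection_utils.py | infer_start_activities
-- ===== SOURCE A (Python) =====
-- def infer_start_activities(dfg):
--     """
--     Infer start activities from a Directly-Follows Graph
--
--     Parameters
--     ----------
--     dfg
--         Directly-Follows Graph
--
--     Returns
--     ----------
--     start_activities
--         Start activities in the log
--     """
--     ingoing = get_ingoing_edges(dfg)
--     outgoing = get_outgoing_edges(dfg)
--
--     start_activities = []
--
--     for act in outgoing:
--         if act not in ingoing:
--             start_activities.append(act)
--
--     return start_activities
--
-- def get_outgoing_edges(dfg):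
--     """
--     Gets outgoing edges of the provided DFG graph
--     """
--     outgoing = {}
--     for el in dfg:
--         if type(el[0]) is str:
--             if not el[0] in outgoing:
--                 outgoing[el[0]] = {}
--             outgoing[el[0]][el[1]] = dfg[el]
--         else:
--             if not el[0][0] in outgoing:
--                 outgoing[el[0][0]] = {}
--             outgoing[el[0][0]][el[0][1]] = el[1]
--     return outgoing
--
-- def get_ingoing_edges(dfg):
--     """
--     Get ingoing edges of the provided DFG graph
--     """
--     ingoing = {}
--     for el in dfg:
--         if type(el[0]) is str:
--             if not el[1] in ingoing:
--                 ingoing[el[1]] = {}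
--             ingoing[el[1]][el[0]] = dfg[el]
--         else:
--             if not el[0][1] in ingoing:
--                 ingoing[el[0][1]] = {}
--             ingoing[el[0][1]][el[0][0]] = el[1]
--     return ingoing
-- ===== SOURCE B (Python) =====
-- def infer_start_activities(dfg):
--     """Brute-force nested scans, no auxiliary dicts/sets: an activity is a start
--     activity iff it is the source of some edge, no earlier edge has the same
--     source (first-appearance order), and no edge anywhere has it as target."""
--     edges = list(dfg)
--     start_activities = []
--     prior = []
--     for el in edges:
--         if type(el[0]) is str:
--             s = el[0]
--         else:
--             s = el[0][0]
--         fresh = True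
--         for e in prior:
--             p = e[0] if type(e[0]) is str else e[0][0]
--             if p == s:
--                 fresh = False
--                 break
--         if fresh:
--             is_target = False
--             for e in edges:
--                 t = e[1] if type(e[0]) is str else e[0][1]
--                 if t == s:
--                     is_target = True
--                     break
--             if not is_target:
--                 start_activities.append(s)
--         prior.append(el)
--     return start_activities
-- ===== Notes on version B (the rewrite author's own statement) =====
-- stated objective: alternative
-- what changed: B drops A's two nested-adjacency-dict helper passes entirely and instead brute-forces each edge's source with two linear scans (over the prior edges for first appearance, over all edges for occurrence as a target), building no dictionary or set at all.
import Mathlib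
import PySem

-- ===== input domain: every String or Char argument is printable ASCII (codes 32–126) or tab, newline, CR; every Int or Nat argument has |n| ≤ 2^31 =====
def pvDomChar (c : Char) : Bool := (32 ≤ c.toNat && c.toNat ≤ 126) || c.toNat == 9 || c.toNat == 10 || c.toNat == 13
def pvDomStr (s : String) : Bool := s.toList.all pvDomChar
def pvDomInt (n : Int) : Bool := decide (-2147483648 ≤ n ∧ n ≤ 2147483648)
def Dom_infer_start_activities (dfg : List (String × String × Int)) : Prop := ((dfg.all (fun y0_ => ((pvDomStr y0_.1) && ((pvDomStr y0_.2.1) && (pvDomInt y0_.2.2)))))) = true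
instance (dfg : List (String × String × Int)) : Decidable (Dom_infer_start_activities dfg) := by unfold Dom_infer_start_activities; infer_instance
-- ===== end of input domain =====

-- B replaces A's two nested-adjacency-dict helper passes by brute-force nested scans (no dict/set built); objective: alternative algorithm, same results.


-- ===== PORT A =====
-- dfg is a Python dict {(a,b): count}; iterating yields keys el = (a, b), so el[0] is a str
-- and only the 'type(el[0]) is str' branch runs.  dfg[el] is a dict lookup (first match in
-- the association list; el is a key of dfg, so a match always exists — the .getD 0 default
-- is unreachable and only totalises the lookup).
def pyDfgGet (dfg : List (String × String × Int)) (a b : String) : Int :=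
  ((dfg.find? (fun q => q.1 == a && q.2.1 == b)).map (·.2.2)).getD 0

def get_outgoing_edges (dfg : List (String × String × Int)) :
    PySem.Dict String (PySem.Dict String Int) :=
  dfg.foldl (fun outgoing el =>
    let outgoing := if outgoing.contains el.1 then outgoing
                    else outgoing.insert el.1 PySem.Dict.empty
    outgoing.modify el.1 PySem.Dict.empty (fun m => m.insert el.2.1 (pyDfgGet dfg el.1 el.2.1)))
    PySem.Dict.empty

def get_ingoing_edges (dfg : List (String × String × Int)) :
    PySem.Dict String (PySem.Dict String Int) :=
  dfg.foldl (fun ingoing el =>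
    let ingoing := if ingoing.contains el.2.1 then ingoing
                   else ingoing.insert el.2.1 PySem.Dict.empty
    ingoing.modify el.2.1 PySem.Dict.empty (fun m => m.insert el.1 (pyDfgGet dfg el.1 el.2.1)))
    PySem.Dict.empty

def infer_start_activities (dfg : List (String × String × Int)) : List String :=
  let ingoing := get_ingoing_edges dfg
  let outgoing := get_outgoing_edges dfg
  outgoing.keys.foldl (fun start_activities act =>
    if ingoing.contains act then start_activities else start_activities ++ [act]) []

-- ===== PORT B =====
-- one loop over the edges, carrying (start_activities, prior); the inner Python loops with
-- 'break' compute exactly a List.any over prior / over all edges.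
def infer_start_activities_alt (dfg : List (String × String × Int)) : List String :=
  let edges := dfg
  (edges.foldl
    (fun (st : List String × List (String × String × Int)) el =>
      let s := el.1
      let fresh := !(st.2.any (fun e => e.1 == s))
      let start_activities :=
        if fresh then
          if !(edges.any (fun e => e.2.1 == s)) then st.1 ++ [s] else st.1
        else st.1
      (start_activities, st.2 ++ [el]))
    ([], [])).1

-- ===== PRECONDITION & SPEC =====
def Spec_infer_start_activities (dfg : List (String × String × Int)) (out : List String) : Prop := out = infer_start_activities_alt dfg
instance (dfg : List (String × String × Int)) (out : List String) : Decidable (Spec_infer_start_activities dfg out) := by unfold Spec_infer_start_activities; infer_instance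

-- ===== CLAIM (what is proved, stated in full; the proofs are below) =====
def Claim_equal_infer_start_activities : Prop := ∀ (dfg : List (String × String × Int)), Dom_infer_start_activities dfg → Spec_infer_start_activities dfg (infer_start_activities dfg)

-- ===== LEMMAS AND PROOFS =====

-- keys of one step of A's dict-building loop = Set.add of the key
lemma keys_step (d : PySem.Dict String (PySem.Dict String Int)) (k : String)
    (f : PySem.Dict String Int → PySem.Dict String Int) :
    ((if d.contains k then d else d.insert k PySem.Dict.empty).modify k PySem.Dict.empty f).keys
      = PySem.Set.add d.keys k := by
  by_cases h : d.contains k = true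
  · rw [if_pos h, PySem.Dict.keys_modify, PySem.Dict.keys_insert_of_contains _ _ h,
      PySem.Set.add]
    rw [show PySem.Set.contains d.keys k = true by
      simpa [PySem.Set.contains, PySem.Dict.contains_eq_decide_mem_keys] using h]
    simp
  · have h' : d.contains k = false := by simpa using h
    rw [if_neg h, PySem.Dict.keys_modify,
      PySem.Dict.keys_insert_of_contains _ _ (PySem.Dict.contains_insert_self _ _ _),
      PySem.Dict.keys_insert_of_not_contains _ _ h', PySem.Set.add]
    rw [show PySem.Set.contains d.keys k = false by
      simpa [PySem.Set.contains, PySem.Dict.contains_eq_decide_mem_keys] using h']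
    simp

-- keys of A's outgoing-building fold = the plain Set fold over the sources
lemma keys_fold_out (dfg l : List (String × String × Int))
    (d : PySem.Dict String (PySem.Dict String Int)) :
    (l.foldl (fun dd el =>
        (if dd.contains el.1 then dd else dd.insert el.1 PySem.Dict.empty).modify
          el.1 PySem.Dict.empty
          (fun m => m.insert el.2.1 (pyDfgGet dfg el.1 el.2.1))) d).keys
      = l.foldl (fun s el => PySem.Set.add s el.1) d.keys := by
  induction l generalizing d with
  | nil => rfl
  | cons e t ih => simp only [List.foldl_cons, ih, keys_step]

-- keys of A's ingoing-building fold = the plain Set fold over the targets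
lemma keys_fold_in (dfg l : List (String × String × Int))
    (d : PySem.Dict String (PySem.Dict String Int)) :
    (l.foldl (fun dd el =>
        (if dd.contains el.2.1 then dd else dd.insert el.2.1 PySem.Dict.empty).modify
          el.2.1 PySem.Dict.empty
          (fun m => m.insert el.1 (pyDfgGet dfg el.1 el.2.1))) d).keys
      = l.foldl (fun s el => PySem.Set.add s el.2.1) d.keys := by
  induction l generalizing d with
  | nil => rfl
  | cons e t ih => simp only [List.foldl_cons, ih, keys_step]

-- A's appending loop over the keys is a filter
lemma foldl_skip_if (S : List String) (C : String → Bool) :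
    S.foldl (fun acc a => if C a then acc else acc ++ [a]) []
      = S.filter (fun a => !C a) := by
  rw [PySem.List.foldl_congr_mem S (fun acc a => if C a then acc else acc ++ [a])
      (fun acc a => if (!C a) then acc ++ [a] else acc) []
      (by intro acc x _; cases h : C x <;> simp [h]),
    PySem.List.foldl_append_if_eq_filter]
  simp

-- membership in a Set.add
lemma contains_add (S : PySem.Set String) (y x : String) :
    PySem.Set.contains (PySem.Set.add S y) x = (PySem.Set.contains S x || x == y) := by
  by_cases hM : y ∈ S <;> by_cases hxy : x = y
  · subst hxy; simp [PySem.Set.add, PySem.Set.contains, hM]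
  · simp [PySem.Set.add, PySem.Set.contains, hM, hxy]
  · subst hxy; simp [PySem.Set.add, PySem.Set.contains, hM]
  · simp [PySem.Set.add, PySem.Set.contains, hM, hxy]

-- membership in the Set fold over a key extractor = a linear any-scan
lemma contains_fold_key (key : String × String × Int → String)
    (l : List (String × String × Int)) (S : PySem.Set String) (x : String) :
    PySem.Set.contains (l.foldl (fun s el => PySem.Set.add s (key el)) S) x
      = (PySem.Set.contains S x || l.any (fun e => key e == x)) := by
  induction l generalizing S with
  | nil => simp
  | cons e t ih =>
    simp only [List.foldl_cons, List.any_cons, ih, contains_add]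
    rw [show (x == key e) = (key e == x) by
        by_cases hh : x = key e
        · subst hh; rfl
        · simp [hh, Ne.symm hh],
      Bool.or_assoc]

-- filtering a Set.add
lemma filter_add (S : PySem.Set String) (s : String) (P : String → Bool) :
    (PySem.Set.add S s).filter P
      = if PySem.Set.contains S s then S.filter P
        else (if P s then S.filter P ++ [s] else S.filter P) := by
  by_cases hM : s ∈ S
  · have hc : PySem.Set.contains S s = true := by simp [PySem.Set.contains, hM]
    simp [PySem.Set.add, hc, hM]
  · have hc : PySem.Set.contains S s = false := by simp [PySem.Set.contains, hM]
    cases hp : P s <;> simp [PySem.Set.add, hc, hM, hp, List.filter_append]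

-- the invariant of B's single fold: its accumulator is the filtered Set fold of the prior edges
lemma b_fold_inv (dfg : List (String × String × Int)) :
    ∀ (l prior : List (String × String × Int)) (acc : List String),
      acc = ((prior.foldl (fun s el => PySem.Set.add s el.1) PySem.Set.empty).filter
              (fun a => !(dfg.any (fun e => e.2.1 == a)))) →
      (l.foldl
        (fun (st : List String × List (String × String × Int)) el =>
          let s := el.1
          let fresh := !(st.2.any (fun e => e.1 == s))
          let start_activities :=
            if fresh then
              if !(dfg.any (fun e => e.2.1 == s)) then st.1 ++ [s] else st.1
            else st.1
          (start_activities, st.2 ++ [el])) (acc, prior)).1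
        = ((prior ++ l).foldl (fun s el => PySem.Set.add s el.1) PySem.Set.empty).filter
            (fun a => !(dfg.any (fun e => e.2.1 == a))) := by
  intro l
  induction l with
  | nil => intro prior acc h; simpa using h
  | cons e t ih =>
    intro prior acc h
    simp only [List.foldl_cons]
    rw [show prior ++ e :: t = (prior ++ [e]) ++ t by simp]
    refine ih (prior ++ [e]) _ ?_
    have hfresh : (prior.any (fun q => q.1 == e.1))
        = PySem.Set.contains (prior.foldl (fun s el => PySem.Set.add s el.1) PySem.Set.empty) e.1 := by
      rw [contains_fold_key (fun el => el.1) prior PySem.Set.empty e.1]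
      simp [PySem.Set.contains, PySem.Set.empty]
    simp only [List.foldl_append, List.foldl_cons, List.foldl_nil]
    rw [filter_add, ← h, hfresh]
    cases hc : PySem.Set.contains (prior.foldl (fun s el => PySem.Set.add s el.1) PySem.Set.empty) e.1 <;>
      simp [hc]

-- ===== VERDICT (by name: the statement is the Claim_ definition above) =====
theorem infer_start_activities_spec : Claim_equal_infer_start_activities := by
  intro dfg _
  unfold Spec_infer_start_activities infer_start_activities infer_start_activities_alt
    get_outgoing_edges get_ingoing_edges
  dsimp only
  have hout := keys_fold_out dfg dfg PySem.Dict.empty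
  have hin := keys_fold_in dfg dfg PySem.Dict.empty
  have hk : PySem.Dict.keys (PySem.Dict.empty (κ := String) (ν := PySem.Dict String Int))
      = PySem.Set.empty := rfl
  rw [hk] at hout hin
  rw [hout, foldl_skip_if]
  have hbase := b_fold_inv dfg dfg [] [] (by simp [PySem.Set.empty])
  simp only [List.nil_append] at hbase
  rw [hbase]
  apply List.filter_congr
  intro x _
  rw [PySem.Dict.contains_eq_decide_mem_keys, hin,
    show (decide (x ∈ dfg.foldl (fun s el => PySem.Set.add s el.2.1) PySem.Set.empty))
        = PySem.Set.contains (dfg.foldl (fun s el => PySem.Set.add s el.2.1) PySem.Set.empty) x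
      by simp [PySem.Set.contains],
    contains_fold_key (fun el => el.2.1) dfg PySem.Set.empty x]
  simp [PySem.Set.contains, PySem.Set.empty]
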